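-- pv_equiv track=rewrite | github.com/benquick123/code-profiling | code/batch-2/vse-naloge-brez-testov/DN7-M-095.py | zapisi_pot
-- ===== SOURCE A (Python) =====
-- def spremeni_kot(kot, smer):
--     if smer == "DESNO":
--         if kot == -90:
--             kot = 180
--         else:
--             kot -= 90
--     else:
--         if kot == 180:
--             kot = -90
--         else:
--             kot += 90
--     return kot
--
-- def zapisi_pot(pot):
--     """
--     Za podano pot vrni seznam ukazov (glej navodila naloge).
--
--     Args:
--         pot (list of tuple of int): pot
--
--     Returns:
--         str: ukazi, napisani po vrsticah
--     """
--     ukazi = ""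
--     i = 1
--     prejsnjix = pot[0][0]
--     prejsnjiy = pot[0][1]
--     kot = 90
--     while i < len(pot):
--         if prejsnjix == pot[i][0]:
--             if prejsnjiy < pot[i][1]:
--                 while kot != -90:
--                     kot = spremeni_kot(kot, "DESNO")
--                     ukazi += "DESNO\n"
--                 ukazi += str(abs(pot[i][1] - prejsnjiy)) + "\n"
--             else:
--                 while kot != 90:
--                     kot = spremeni_kot(kot, "DESNO")
--                     ukazi += "DESNO\n"
--                 ukazi += str(abs(pot[i][1] + prejsnjiy)) + "\n"
--         else:
--             if prejsnjix < pot[i][0]: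
--                 while kot != 0:
--                     kot = spremeni_kot(kot, "DESNO")
--                     ukazi += "DESNO\n"
--                 ukazi += str(abs(pot[i][0] - prejsnjix)) + "\n"
--             else:
--                 while kot != 180:
--                     kot = spremeni_kot(kot, "DESNO")
--                     ukazi += "DESNO\n"
--                 ukazi += str(abs(pot[i][0] + prejsnjix)) + "\n"
--         prejsnjix = pot[i][0]
--         prejsnjiy = pot[i][1]
--         i += 1
--     return ukazi
-- ===== SOURCE B (Python) =====
-- def zapisi_pot(pot):
--     """
--     Za podano pot vrni seznam ukazov (glej navodila naloge).
--
--     Args: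
--         pot (list of tuple of int): pot
--
--     Returns:
--         str: ukazi, napisani po vrsticah
--     """
--     ukazi = []
--     px, py = pot[0]
--     kot = 90
--     for x, y in pot[1:]:
--         if px == x:
--             if py < y:
--                 target, dist = -90, abs(y - py)
--             else:
--                 target, dist = 90, abs(y + py)
--         else:
--             if px < x:
--                 target, dist = 0, abs(x - px)
--             else:
--                 target, dist = 180, abs(x + px)
--         ukazi.append("DESNO\n" * (((kot - target) % 360) // 90))
--         ukazi.append(str(dist) + "\n")
--         kot = target
--         px, py = x, y
--     return "".join(ukazi)
-- ===== Notes on version B (the rewrite author's own statement) =====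
-- stated objective: simpler
-- what changed: Replaces the inner rotation while-loops and the spremeni_kot state machine with a closed-form turn count ((kot-target)%360)//90 and string repetition, and builds the output as a joined list of pieces over consecutive pairs instead of index-based string concatenation.
import Mathlib
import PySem

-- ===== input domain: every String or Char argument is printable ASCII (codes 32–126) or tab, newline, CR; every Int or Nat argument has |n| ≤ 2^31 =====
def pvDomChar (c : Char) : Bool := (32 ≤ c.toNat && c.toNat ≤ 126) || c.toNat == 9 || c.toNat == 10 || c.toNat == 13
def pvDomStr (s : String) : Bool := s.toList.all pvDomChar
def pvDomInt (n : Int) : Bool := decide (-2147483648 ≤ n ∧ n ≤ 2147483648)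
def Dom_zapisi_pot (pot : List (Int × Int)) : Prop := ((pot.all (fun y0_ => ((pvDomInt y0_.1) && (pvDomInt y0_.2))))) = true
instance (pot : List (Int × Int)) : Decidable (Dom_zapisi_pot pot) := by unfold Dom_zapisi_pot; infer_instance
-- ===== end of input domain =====

-- B replaces the inner rotation while-loops with a closed-form turn count and joins
-- accumulated pieces instead of repeated string concatenation (objective: simpler).
-- A raises IndexError on the empty path (pot[0]); Pre_ excludes exactly that input.

-- ===== PORT A =====
def spremeni_kotL (kot : Int) (smer : String) : Int :=
  if smer == "DESNO" then
    if kot == -90 then 180 else kot - 90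
  else
    if kot == 180 then -90 else kot + 90

-- the inner 'while kot != target' loop; fuel 4 suffices because kot cycles through
-- {90, 0, -90, 180} (it only makes the recursion total, never changes the value reached)
def rotateDesno (target : Int) (kot : Int) (ukazi : String) : Nat → Int × String
  | 0 => (kot, ukazi)
  | n + 1 =>
    if kot ≠ target then
      rotateDesno target (spremeni_kotL kot "DESNO") (ukazi ++ "DESNO\n") n
    else (kot, ukazi)

-- the outer while loop over i, as structural recursion over the remaining points
def zapisiLoop (rest : List (Int × Int)) (prejsnjix prejsnjiy kot : Int) (ukazi : String) : String :=
  match rest with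
  | [] => ukazi
  | (x, y) :: t =>
    if prejsnjix = x then
      if prejsnjiy < y then
        let (k, u) := rotateDesno (-90) kot ukazi 4
        zapisiLoop t x y k (u ++ PySem.Int.toStr |y - prejsnjiy| ++ "\n")
      else
        let (k, u) := rotateDesno 90 kot ukazi 4
        zapisiLoop t x y k (u ++ PySem.Int.toStr |y + prejsnjiy| ++ "\n")
    else
      if prejsnjix < x then
        let (k, u) := rotateDesno 0 kot ukazi 4
        zapisiLoop t x y k (u ++ PySem.Int.toStr |x - prejsnjix| ++ "\n")
      else
        let (k, u) := rotateDesno 180 kot ukazi 4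
        zapisiLoop t x y k (u ++ PySem.Int.toStr |x + prejsnjix| ++ "\n")

def zapisi_pot (pot : List (Int × Int)) : String :=
  match pot with
  | [] => ""  -- unreached: Pre_ excludes the empty path (Python raises IndexError)
  | (px, py) :: t => zapisiLoop t px py 90 ""

-- ===== PORT B =====
-- "DESNO\n" * (((kot - target) % 360) // 90), Python semantics
def desnoRepeat (kot target : Int) : String :=
  String.join (List.replicate (PySem.Int.floordiv (PySem.Int.mod (kot - target) 360) 90).toNat "DESNO\n")

def altPieces (rest : List (Int × Int)) (px py kot : Int) : List String :=
  match rest with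
  | [] => []
  | (x, y) :: t =>
    let td : Int × Int :=
      if px = x then
        if py < y then (-90, |y - py|) else (90, |y + py|)
      else
        if px < x then (0, |x - px|) else (180, |x + px|)
    desnoRepeat kot td.1 :: (PySem.Int.toStr td.2 ++ "\n") :: altPieces t x y td.1

def zapisi_pot_alt (pot : List (Int × Int)) : String :=
  match pot with
  | [] => ""  -- unreached: Pre_ excludes the empty path
  | (px, py) :: t => String.join (altPieces t px py 90)

-- ===== PRECONDITION & SPEC =====
-- Pre_ excludes exactly the empty list, on which Python A raises IndexError at pot[0].
def Pre_zapisi_pot (pot : List (Int × Int)) : Prop := pot ≠ []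
instance (pot : List (Int × Int)) : Decidable (Pre_zapisi_pot pot) := by unfold Pre_zapisi_pot; infer_instance
def pvWitness_zapisi_pot : (List (Int × Int)) := [(0, 0), (0, 3)]

def Spec_zapisi_pot (pot : List (Int × Int)) (out : String) : Prop := out = zapisi_pot_alt pot
instance (pot : List (Int × Int)) (out : String) : Decidable (Spec_zapisi_pot pot out) := by unfold Spec_zapisi_pot; infer_instance

-- ===== CLAIM (what is proved, stated in full; the proofs are below) =====
def Claim_equal_zapisi_pot : Prop := ∀ (pot : List (Int × Int)), Dom_zapisi_pot pot → Pre_zapisi_pot pot → Spec_zapisi_pot pot (zapisi_pot pot)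

-- ===== LEMMAS AND PROOFS =====

-- the headings the programs ever hold
def Kot4 (kot : Int) : Prop := kot = 90 ∨ kot = 0 ∨ kot = -90 ∨ kot = 180

theorem join_foldl (x : String) (l : List String) :
    l.foldl (· ++ ·) x = x ++ String.join l := by
  induction l generalizing x with
  | nil => simp [String.join]
  | cons a t ih =>
    unfold String.join
    rw [List.foldl_cons, List.foldl_cons, ih, ih]
    simp [String.append_assoc]

theorem join_cons (a : String) (l : List String) : String.join (a :: l) = a ++ String.join l := by
  unfold String.join
  rw [List.foldl_cons, join_foldl]
  simp [String.join]

lemma rotate_closed (target kot : Int) (u : String)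
    (hk : Kot4 kot) (ht : Kot4 target) :
    rotateDesno target kot u 4 = (target, u ++ desnoRepeat kot target) := by
  rcases hk with rfl | rfl | rfl | rfl <;> rcases ht with rfl | rfl | rfl | rfl <;>
    simp [rotateDesno, spremeni_kotL, desnoRepeat, PySem.Int.floordiv, PySem.Int.mod,
      String.join, List.replicate, String.append_assoc]

lemma loop_eq (rest : List (Int × Int)) (px py kot : Int) (u : String) (hk : Kot4 kot) :
    zapisiLoop rest px py kot u = u ++ String.join (altPieces rest px py kot) := by
  induction rest generalizing px py kot u with
  | nil => simp [zapisiLoop, altPieces, String.join]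
  | cons p t ih =>
    obtain ⟨x, y⟩ := p
    rw [zapisiLoop, altPieces]
    by_cases hx : px = x
    · by_cases hy : py < y
      · simp only [hx, hy, if_pos,
          rotate_closed (-90) kot u hk (by right; right; left; rfl)]
        rw [ih _ _ _ _ (by right; right; left; rfl), join_cons, join_cons]
        simp [String.append_assoc]
      · simp only [hx, hy, if_pos, if_false,
          rotate_closed 90 kot u hk (by left; rfl)]
        rw [ih _ _ _ _ (by left; rfl), join_cons, join_cons]
        simp [String.append_assoc]
    · by_cases hlt : px < x
      · simp only [hx, hlt, if_pos, ite_false,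
          rotate_closed 0 kot u hk (by right; left; rfl)]
        rw [ih _ _ _ _ (by right; left; rfl), join_cons, join_cons]
        simp [String.append_assoc]
      · simp only [hx, hlt, if_neg, ite_false,
          rotate_closed 180 kot u hk (by right; right; right; rfl)]
        rw [ih _ _ _ _ (by right; right; right; rfl), join_cons, join_cons]
        simp [String.append_assoc]

-- ===== VERDICT (by name: the statement is the Claim_ definition above) =====
theorem zapisi_pot_spec : Claim_equal_zapisi_pot := by
  intro pot _ hpre
  unfold Spec_zapisi_pot
  match pot with
  | [] => exact absurd rfl hpre
  | (px, py) :: t =>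
    simpa [zapisi_pot, zapisi_pot_alt] using loop_eq t px py 90 "" (by left; rfl)
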